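-- pv_equiv track=rewrite | github.com/stonemoose/advent_of_code | 2025/09/solver.py | crosses_line
-- ===== SOURCE A (Python) =====
-- def crosses_line(line, start, end):
--     square = [start, (start[0], end[1]), end, (end[0], start[1])]
--     edges = list(zip(square, square[1:] + [square[0]]))
--
--     if line[0][0] == line[1][0]:
--         return any(
--             min(line[0][1], line[1][1]) <= edge[0][1] <= max(line[0][1], line[1][1])
--             and min(edge[0][0], edge[1][0]) < line[0][0] < max(edge[0][0], edge[1][0])
--             for edge in edges
--         )
--     return any(
--         min(line[0][0], line[1][0]) <= edge[0][0] <= max(line[0][0], line[1][0])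
--         and min(edge[0][1], edge[1][1]) < line[0][1] < max(edge[0][1], edge[1][1])
--         for edge in edges
--     )
-- ===== SOURCE B (Python) =====
-- def crosses_line(line, start, end):
--     (lx0, ly0), (lx1, ly1) = line
--     sx, sy = start
--     ex, ey = end
--     if lx0 == lx1:
--         return min(sx, ex) < lx0 < max(sx, ex) and (
--             min(ly0, ly1) <= sy <= max(ly0, ly1)
--             or min(ly0, ly1) <= ey <= max(ly0, ly1)
--         )
--     return min(sy, ey) < ly0 < max(sy, ey) and (
--         min(lx0, lx1) <= sx <= max(lx0, lx1)
--         or min(lx0, lx1) <= ex <= max(lx0, lx1)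
--     )
-- ===== Notes on version B (the rewrite author's own statement) =====
-- stated objective: simpler
-- what changed: Replaces the square-vertex/edge-list construction and the any() scan over four edges by a direct closed-form boolean on the rectangle's min/max bounds in each branch.
import Mathlib
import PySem

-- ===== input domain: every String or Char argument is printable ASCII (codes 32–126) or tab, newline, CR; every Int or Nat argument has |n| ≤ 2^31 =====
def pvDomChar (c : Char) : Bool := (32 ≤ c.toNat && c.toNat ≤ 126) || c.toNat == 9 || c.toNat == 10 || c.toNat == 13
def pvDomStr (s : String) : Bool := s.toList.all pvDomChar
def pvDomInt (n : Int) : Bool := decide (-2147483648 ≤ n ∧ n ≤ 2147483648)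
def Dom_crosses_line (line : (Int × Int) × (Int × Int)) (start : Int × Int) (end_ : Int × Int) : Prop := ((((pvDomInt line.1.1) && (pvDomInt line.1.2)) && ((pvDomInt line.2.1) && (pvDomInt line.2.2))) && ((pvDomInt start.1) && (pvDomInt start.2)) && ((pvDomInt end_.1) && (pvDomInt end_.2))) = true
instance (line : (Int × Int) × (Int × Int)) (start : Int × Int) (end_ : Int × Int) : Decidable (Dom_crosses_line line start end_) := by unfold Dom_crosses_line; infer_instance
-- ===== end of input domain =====

-- B replaces A's square/edge-list + any() scan by a closed-form bounds test per branch (simpler).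


-- ===== PORT A =====
def crosses_line (line : (Int × Int) × (Int × Int)) (start : Int × Int) (end_ : Int × Int) : Bool :=
  let square : List (Int × Int) := [start, (start.1, end_.2), end_, (end_.1, start.2)]
  let edges := List.zip square (square.drop 1 ++ [square.headD (0, 0)])
  if line.1.1 = line.2.1 then
    edges.any (fun edge =>
      decide (min line.1.2 line.2.2 ≤ edge.1.2 ∧ edge.1.2 ≤ max line.1.2 line.2.2) &&
      decide (min edge.1.1 edge.2.1 < line.1.1 ∧ line.1.1 < max edge.1.1 edge.2.1))
  else
    edges.any (fun edge =>
      decide (min line.1.1 line.2.1 ≤ edge.1.1 ∧ edge.1.1 ≤ max line.1.1 line.2.1) &&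
      decide (min edge.1.2 edge.2.2 < line.1.2 ∧ line.1.2 < max edge.1.2 edge.2.2))

-- ===== PORT B =====
def crosses_line_alt (line : (Int × Int) × (Int × Int)) (start : Int × Int) (end_ : Int × Int) : Bool :=
  if line.1.1 = line.2.1 then
    decide (min start.1 end_.1 < line.1.1 ∧ line.1.1 < max start.1 end_.1) &&
    (decide (min line.1.2 line.2.2 ≤ start.2 ∧ start.2 ≤ max line.1.2 line.2.2) ||
     decide (min line.1.2 line.2.2 ≤ end_.2 ∧ end_.2 ≤ max line.1.2 line.2.2))
  else
    decide (min start.2 end_.2 < line.1.2 ∧ line.1.2 < max start.2 end_.2) &&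
    (decide (min line.1.1 line.2.1 ≤ start.1 ∧ start.1 ≤ max line.1.1 line.2.1) ||
     decide (min line.1.1 line.2.1 ≤ end_.1 ∧ end_.1 ≤ max line.1.1 line.2.1))

-- ===== PRECONDITION & SPEC =====
def Spec_crosses_line (line : (Int × Int) × (Int × Int)) (start : Int × Int) (end_ : Int × Int) (out : Bool) : Prop := out = crosses_line_alt line start end_
instance (line : (Int × Int) × (Int × Int)) (start : Int × Int) (end_ : Int × Int) (out : Bool) : Decidable (Spec_crosses_line line start end_ out) := by unfold Spec_crosses_line; infer_instance

-- ===== CLAIM (what is proved, stated in full; the proofs are below) =====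
def Claim_equal_crosses_line : Prop := ∀ (line : (Int × Int) × (Int × Int)) (start : Int × Int) (end_ : Int × Int), Dom_crosses_line line start end_ → Spec_crosses_line line start end_ (crosses_line line start end_)

-- ===== LEMMAS AND PROOFS =====

-- ===== VERDICT (by name: the statement is the Claim_ definition above) =====
theorem crosses_line_spec : Claim_equal_crosses_line := by
  intro line start end_ _
  unfold Spec_crosses_line
  obtain ⟨⟨lx0, ly0⟩, lx1, ly1⟩ := line
  obtain ⟨sx, sy⟩ := start
  obtain ⟨ex, ey⟩ := end_
  rw [Bool.eq_iff_iff]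
  simp [crosses_line, crosses_line_alt]
  split_ifs <;> constructor <;> intro h <;> omega
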